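-- pv_equiv track=rewrite | github.com/debraj-m/Social-Media-Automation | core/image_generation/generator.py | detect_scenario_from_content
-- ===== SOURCE A (Python) =====
-- def detect_scenario_from_content(content: str) -> str:
--     """Detect scenario from story content"""
--     content_lower = content.lower()
--
--     scenario_keywords = {
--         "school": ["school", "classroom", "student", "teacher", "homework", "study", "learning", "education"],
--         "college": ["university", "college", "campus", "degree", "graduation", "dorm", "lecture", "professor"],
--         "workplace": ["office", "work", "job", "career", "business", "meeting", "colleague", "professional"],
--         "garden": ["garden", "flowers", "plants", "nature", "outdoor", "green", "growing", "bloom"],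
--         "cafe": ["coffee", "cafe", "latte", "barista", "espresso", "cappuccino", "coffee shop"],
--         "library": ["library", "books", "reading", "quiet", "study", "research", "knowledge"],
--         "park": ["park", "outdoor", "walking", "nature", "trees", "fresh air", "exercise"],
--         "home": ["home", "house", "family", "comfortable", "cozy", "living room", "kitchen"],
--         "gym": ["gym", "workout", "exercise", "fitness", "training", "health", "sports"],
--         "beach": ["beach", "ocean", "waves", "sand", "vacation", "summer", "swimming"]
--     }
--
--     # Count matches for each scenario
--     scenario_scores = {}
--     for scenario, keywords in scenario_keywords.items():
--         score = sum(1 for keyword in keywords if keyword in content_lower)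
--         scenario_scores[scenario] = score
--
--     # Return the scenario with highest score, default to workplace
--     best_scenario = max(scenario_scores, key=scenario_scores.get)
--     return best_scenario if scenario_scores[best_scenario] > 0 else "workplace"
-- ===== SOURCE B (Python) =====
-- # Inverted index: keyword -> scenarios whose keyword list contains it (precomputed
-- # from the scenario table; 'study', 'nature', 'outdoor', 'exercise' occur twice).
-- _KEYWORD_SCENARIOS = {
--     "school": ["school"], "classroom": ["school"], "student": ["school"],
--     "teacher": ["school"], "homework": ["school"], "study": ["school", "library"],
--     "learning": ["school"], "education": ["school"],
--     "university": ["college"], "college": ["college"], "campus": ["college"],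
--     "degree": ["college"], "graduation": ["college"], "dorm": ["college"],
--     "lecture": ["college"], "professor": ["college"],
--     "office": ["workplace"], "work": ["workplace"], "job": ["workplace"],
--     "career": ["workplace"], "business": ["workplace"], "meeting": ["workplace"],
--     "colleague": ["workplace"], "professional": ["workplace"],
--     "garden": ["garden"], "flowers": ["garden"], "plants": ["garden"],
--     "nature": ["garden", "park"], "outdoor": ["garden", "park"],
--     "green": ["garden"], "growing": ["garden"], "bloom": ["garden"],
--     "coffee": ["cafe"], "cafe": ["cafe"], "latte": ["cafe"], "barista": ["cafe"],
--     "espresso": ["cafe"], "cappuccino": ["cafe"], "coffee shop": ["cafe"],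
--     "library": ["library"], "books": ["library"], "reading": ["library"],
--     "quiet": ["library"], "research": ["library"], "knowledge": ["library"],
--     "park": ["park"], "walking": ["park"], "trees": ["park"],
--     "fresh air": ["park"], "exercise": ["park", "gym"],
--     "home": ["home"], "house": ["home"], "family": ["home"],
--     "comfortable": ["home"], "cozy": ["home"], "living room": ["home"],
--     "kitchen": ["home"],
--     "gym": ["gym"], "workout": ["gym"], "fitness": ["gym"],
--     "training": ["gym"], "health": ["gym"], "sports": ["gym"],
--     "beach": ["beach"], "ocean": ["beach"], "waves": ["beach"], "sand": ["beach"],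
--     "vacation": ["beach"], "summer": ["beach"], "swimming": ["beach"],
-- }
--
-- _SCENARIOS = ["school", "college", "workplace", "garden", "cafe",
--               "library", "park", "home", "gym", "beach"]
--
--
-- def detect_scenario_from_content(content: str) -> str:
--     """Detect scenario from story content.
--
--     Single pass over the distinct keywords of the inverted index: each matching
--     keyword bumps the counters of the scenarios it belongs to; then a running
--     strict-max scan over the scenarios (seeded with the 'workplace' default at
--     score 0) picks the first scenario with the highest positive count.
--     """
--     content_lower = content.lower()
--     counts = dict.fromkeys(_SCENARIOS, 0)
--     for keyword, scenarios in _KEYWORD_SCENARIOS.items():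
--         if keyword in content_lower:
--             for scenario in scenarios:
--                 counts[scenario] += 1
--     best, best_score = "workplace", 0
--     for scenario in _SCENARIOS:
--         if counts[scenario] > best_score:
--             best, best_score = scenario, counts[scenario]
--     return best
-- ===== Notes on version B (the rewrite author's own statement) =====
-- stated objective: alternative
-- what changed: Replaced the per-scenario scoring loops plus the separate max(..., key=...) pass by a precomputed inverted index (keyword -> scenarios): one pass over the 70 distinct keywords bumps scenario counters (shared keywords like 'study'/'outdoor'/'nature'/'exercise' are substring-searched once instead of twice), then a running strict-max scan seeded with ('workplace', 0) picks the winner, which also absorbs the all-zero default.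
import Mathlib
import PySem

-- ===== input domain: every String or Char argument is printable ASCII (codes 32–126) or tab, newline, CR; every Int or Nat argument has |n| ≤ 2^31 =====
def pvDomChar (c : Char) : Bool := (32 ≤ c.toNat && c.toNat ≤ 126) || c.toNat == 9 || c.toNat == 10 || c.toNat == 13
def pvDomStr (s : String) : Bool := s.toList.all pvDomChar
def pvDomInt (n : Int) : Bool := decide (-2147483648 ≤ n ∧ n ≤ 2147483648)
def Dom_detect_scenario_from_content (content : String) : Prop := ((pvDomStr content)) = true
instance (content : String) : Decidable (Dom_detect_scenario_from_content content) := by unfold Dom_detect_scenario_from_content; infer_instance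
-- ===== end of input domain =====

-- B replaces A's per-scenario scoring loops and separate max(..., key=...) pass by a
-- precomputed inverted index (keyword -> scenarios) counted in one pass over the
-- distinct keywords, followed by a running strict-max scan (alternative decomposition).

-- ===== PORT A =====
-- A's scenario → keywords dict literal (distinct keys, so its .items() is this list in order).
def scenarioKeywords : List (String × List String) := [
  ("school", ["school", "classroom", "student", "teacher", "homework", "study", "learning", "education"]),
  ("college", ["university", "college", "campus", "degree", "graduation", "dorm", "lecture", "professor"]),
  ("workplace", ["office", "work", "job", "career", "business", "meeting", "colleague", "professional"]),
  ("garden", ["garden", "flowers", "plants", "nature", "outdoor", "green", "growing", "bloom"]),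
  ("cafe", ["coffee", "cafe", "latte", "barista", "espresso", "cappuccino", "coffee shop"]),
  ("library", ["library", "books", "reading", "quiet", "study", "research", "knowledge"]),
  ("park", ["park", "outdoor", "walking", "nature", "trees", "fresh air", "exercise"]),
  ("home", ["home", "house", "family", "comfortable", "cozy", "living room", "kitchen"]),
  ("gym", ["gym", "workout", "exercise", "fitness", "training", "health", "sports"]),
  ("beach", ["beach", "ocean", "waves", "sand", "vacation", "summer", "swimming"])]

-- A: build the scenario_scores dict, then max(scenario_scores, key=scenario_scores.get);
-- Python's max never raises here (the key list is non-empty), so the `none` branch is unreachable.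
-- A's local `scenario_scores` as a helper over the lowered content.
def scenarioScores (content_lower : String) : PySem.Dict String Int :=
  scenarioKeywords.foldl (fun d p =>
    d.insert p.1 (((p.2.filter (fun kw => PySem.Str.isIn kw content_lower)).map (fun _ => (1 : Int))).sum)) ∅

def detect_scenario_from_content (content : String) : String :=
  let content_lower := PySem.Str.lower content
  match PySem.List.max? (scenarioScores content_lower).keys
      (fun k => (scenarioScores content_lower).getD k 0) with
  | some best_scenario =>
      if (scenarioScores content_lower).getD best_scenario 0 > 0 then best_scenario else "workplace"
  | none => "workplace"

-- ===== PORT B =====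
-- B's precomputed inverted index _KEYWORD_SCENARIOS: keyword → scenarios containing it.
def keywordScenarios : List (String × List String) := [
  ("school", ["school"]), ("classroom", ["school"]), ("student", ["school"]),
  ("teacher", ["school"]), ("homework", ["school"]), ("study", ["school", "library"]),
  ("learning", ["school"]), ("education", ["school"]),
  ("university", ["college"]), ("college", ["college"]), ("campus", ["college"]),
  ("degree", ["college"]), ("graduation", ["college"]), ("dorm", ["college"]),
  ("lecture", ["college"]), ("professor", ["college"]),
  ("office", ["workplace"]), ("work", ["workplace"]), ("job", ["workplace"]),
  ("career", ["workplace"]), ("business", ["workplace"]), ("meeting", ["workplace"]),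
  ("colleague", ["workplace"]), ("professional", ["workplace"]),
  ("garden", ["garden"]), ("flowers", ["garden"]), ("plants", ["garden"]),
  ("nature", ["garden", "park"]), ("outdoor", ["garden", "park"]),
  ("green", ["garden"]), ("growing", ["garden"]), ("bloom", ["garden"]),
  ("coffee", ["cafe"]), ("cafe", ["cafe"]), ("latte", ["cafe"]), ("barista", ["cafe"]),
  ("espresso", ["cafe"]), ("cappuccino", ["cafe"]), ("coffee shop", ["cafe"]),
  ("library", ["library"]), ("books", ["library"]), ("reading", ["library"]),
  ("quiet", ["library"]), ("research", ["library"]), ("knowledge", ["library"]),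
  ("park", ["park"]), ("walking", ["park"]), ("trees", ["park"]),
  ("fresh air", ["park"]), ("exercise", ["park", "gym"]),
  ("home", ["home"]), ("house", ["home"]), ("family", ["home"]),
  ("comfortable", ["home"]), ("cozy", ["home"]), ("living room", ["home"]),
  ("kitchen", ["home"]),
  ("gym", ["gym"]), ("workout", ["gym"]), ("fitness", ["gym"]),
  ("training", ["gym"]), ("health", ["gym"]), ("sports", ["gym"]),
  ("beach", ["beach"]), ("ocean", ["beach"]), ("waves", ["beach"]), ("sand", ["beach"]),
  ("vacation", ["beach"]), ("summer", ["beach"]), ("swimming", ["beach"])]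

-- B's _SCENARIOS list.
def scenariosList : List String :=
  ["school", "college", "workplace", "garden", "cafe", "library", "park", "home", "gym", "beach"]

-- B's local `counts`: dict.fromkeys(_SCENARIOS, 0), then one pass over the inverted
-- index bumping the counters of each matched keyword's scenarios.
def scenarioCounts (content_lower : String) : PySem.Dict String Int :=
  keywordScenarios.foldl (fun d p =>
    if PySem.Str.isIn p.1 content_lower then
      p.2.foldl (fun d' s => d'.modify s 0 (· + 1)) d
    else d)
    (scenariosList.foldl (fun d s => d.insert s 0) ∅)

-- B: count via the inverted index, then the running strict-max scan.
def detect_scenario_from_content_alt (content : String) : String :=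
  let content_lower := PySem.Str.lower content
  let counts := scenarioCounts content_lower
  let st := scenariosList.foldl (fun (st : String × Int) s =>
      if counts.getD s 0 > st.2 then (s, counts.getD s 0) else st) ("workplace", 0)
  st.1

-- ===== PRECONDITION & SPEC =====
def Spec_detect_scenario_from_content (content : String) (out : String) : Prop := out = detect_scenario_from_content_alt content
instance (content : String) (out : String) : Decidable (Spec_detect_scenario_from_content content out) := by unfold Spec_detect_scenario_from_content; infer_instance

-- ===== CLAIM (what is proved, stated in full; the proofs are below) =====
def Claim_equal_detect_scenario_from_content : Prop := ∀ (content : String), Dom_detect_scenario_from_content content → Spec_detect_scenario_from_content content (detect_scenario_from_content content)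

-- ===== LEMMAS AND PROOFS =====

-- Proof-side vocabulary (loop bodies of the two ports, named).
def pvKeyStep (keyf : String → Int) (acc : Option String) (x : String) : Option String :=
  match acc with
  | none => some x
  | some m => if keyf m < keyf x then some x else some m

def pvG (keyf : String → Int) (m x : String) : String := if keyf m < keyf x then x else m

def pvStepB (keyf : String → Int) (st : String × Int) (x : String) : String × Int :=
  if keyf x > st.2 then (x, keyf x) else st

-- B's scenario list without its head (the tail of scenariosList, spelt out).
def pvRest : List String :=
  ["college", "workplace", "garden", "cafe", "library", "park", "home", "gym", "beach"]

-- Python's max(xs, key=f) as the first-extremal running fold.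
theorem max?_eq_foldl (keyf : String → Int) (l : List String) :
    PySem.List.max? l keyf = l.foldl (pvKeyStep keyf) none := by
  unfold PySem.List.max?
  congr 1
  funext acc x
  cases acc <;> rfl

-- A's max?-fold started at `some b` never returns none: it is the plain argmax fold.
theorem maxfold_some (keyf : String → Int) (names : List String) : ∀ (b : String),
    names.foldl (pvKeyStep keyf) (some b) = some (names.foldl (pvG keyf) b) := by
  induction names with
  | nil => intro b; rfl
  | cons x t ih =>
    intro b
    simp only [List.foldl_cons]
    rw [show pvKeyStep keyf (some b) x = some (pvG keyf b x) from by
          by_cases h : keyf b < keyf x <;> simp [pvKeyStep, pvG, h]]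
    exact ih (pvG keyf b x)

-- A's `sum(1 for kw in keywords if kw in content_lower)` as a sum of indicator terms.
theorem sum_filter_map_one (l : List String) (f : String → Bool) :
    ((l.filter f).map (fun _ => (1 : Int))).sum
      = (l.map (fun kw => if f kw then (1 : Int) else 0)).sum := by
  induction l with
  | nil => rfl
  | cons x t ih =>
    by_cases h : f x
    · rw [List.filter_cons_of_pos h, List.map_cons, List.sum_cons, List.map_cons, List.sum_cons,
        if_pos h, ih]
    · rw [List.filter_cons_of_neg h, List.map_cons, List.sum_cons, if_neg h, ih, zero_add]

-- B's conditional counter-bump pass, read off per key.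
theorem getD_condIncr (cl : String) (k : String) : ∀ (items : List (String × List String))
    (d : PySem.Dict String Int),
    (items.foldl (fun d p =>
        if PySem.Str.isIn p.1 cl then p.2.foldl (fun d' s => d'.modify s 0 (· + 1)) d else d) d).getD k 0
      = d.getD k 0
        + (items.map (fun p => if PySem.Str.isIn p.1 cl then ((p.2.count k : Nat) : Int) else 0)).sum := by
  intro items
  induction items with
  | nil => intro d; simp
  | cons p t ih =>
    intro d
    simp only [List.foldl_cons, List.map_cons, List.sum_cons]
    by_cases h : PySem.Str.isIn p.1 cl
    · rw [if_pos h, if_pos h, ih, PySem.Dict.getD_foldl_modify_add_one]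
      ring
    · rw [if_neg h, if_neg h, ih]
      ring

-- B's fused strict-max fold computes the argmax together with its score when seeded coherently.
theorem fusedB (keyf : String → Int) : ∀ (l : List String) (b : String),
    l.foldl (pvStepB keyf) (b, keyf b)
      = (l.foldl (pvG keyf) b, keyf (l.foldl (pvG keyf) b)) := by
  intro l
  induction l with
  | nil => intro b; rfl
  | cons x t ih =>
    intro b
    simp only [List.foldl_cons]
    by_cases h : keyf b < keyf x
    · rw [show pvStepB keyf (b, keyf b) x = (x, keyf x) from by simp [pvStepB, h],
          show pvG keyf b x = x from by simp [pvG, h]]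
      exact ih x
    · rw [show pvStepB keyf (b, keyf b) x = (b, keyf b) from by simp [pvStepB, h],
          show pvG keyf b x = b from by simp [pvG, h]]
      exact ih b

-- The argmax fold's score never drops below the seed's.
theorem keyf_le_fold (keyf : String → Int) : ∀ (l : List String) (b : String),
    keyf b ≤ keyf (l.foldl (pvG keyf) b) := by
  intro l
  induction l with
  | nil => intro b; exact le_refl _
  | cons x t ih =>
    intro b
    simp only [List.foldl_cons]
    by_cases h : keyf b < keyf x
    · rw [show pvG keyf b x = x from by simp [pvG, h]]
      exact le_of_lt (lt_of_lt_of_le h (ih x))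
    · rw [show pvG keyf b x = b from by simp [pvG, h]]
      exact ih b

-- The argmax fold's result is the seed or a list element.
theorem fold_mem (keyf : String → Int) : ∀ (l : List String) (b : String),
    l.foldl (pvG keyf) b = b ∨ l.foldl (pvG keyf) b ∈ l := by
  intro l
  induction l with
  | nil => intro b; exact Or.inl rfl
  | cons x t ih =>
    intro b
    simp only [List.foldl_cons]
    by_cases h : keyf b < keyf x
    · rw [show pvG keyf b x = x from by simp [pvG, h]]
      rcases ih x with h' | h'
      · exact Or.inr (by rw [h']; exact List.mem_cons_self)
      · exact Or.inr (List.mem_cons_of_mem x h')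
    · rw [show pvG keyf b x = b from by simp [pvG, h]]
      rcases ih b with h' | h'
      · exact Or.inl h'
      · exact Or.inr (List.mem_cons_of_mem x h')

-- The argmax fold only looks at the key function on the seed and the list.
theorem foldG_congr (k1 k2 : String → Int) : ∀ (l : List String) (b : String),
    (∀ x ∈ b :: l, k1 x = k2 x) → l.foldl (pvG k1) b = l.foldl (pvG k2) b := by
  intro l
  induction l with
  | nil => intro b _; rfl
  | cons x t ih =>
    intro b hag
    have hb := hag b List.mem_cons_self
    have hx := hag x (List.mem_cons_of_mem b List.mem_cons_self)
    simp only [List.foldl_cons]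
    have hg : pvG k1 b x = pvG k2 b x := by simp [pvG, hb, hx]
    rw [hg]
    refine ih (pvG k2 b x) ?_
    intro y hy
    rcases List.mem_cons.mp hy with rfl | hy'
    · rcases (by by_cases h : k2 b < k2 x <;> simp [pvG, h] : pvG k2 b x = x ∨ pvG k2 b x = b) with h | h
      · rw [h]; exact hx
      · rw [h]; exact hb
    · exact hag y (List.mem_cons_of_mem b (List.mem_cons_of_mem x hy'))

-- B's strict-max scan seeded with ("workplace", 0), against the argmax fold from a ≤ 0 seed.
theorem stepB_zero_seed (keyf : String → Int) : ∀ (l : List String) (b0 : String),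
    keyf b0 ≤ 0 →
    (l.foldl (pvStepB keyf) ("workplace", 0)).1
      = if 0 < keyf (l.foldl (pvG keyf) b0) then l.foldl (pvG keyf) b0 else "workplace" := by
  intro l
  induction l with
  | nil =>
    intro b0 h0
    simp only [List.foldl_nil]
    rw [if_neg (not_lt.mpr h0)]
  | cons x t ih =>
    intro b0 h0
    simp only [List.foldl_cons]
    by_cases h : 0 < keyf x
    · rw [show pvStepB keyf ("workplace", 0) x = (x, keyf x) from by simp [pvStepB, h],
          show pvG keyf b0 x = x from by simp [pvG, lt_of_le_of_lt h0 h],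
          fusedB keyf t x]
      rw [if_pos (lt_of_lt_of_le h (keyf_le_fold keyf t x))]
    · rw [show pvStepB keyf ("workplace", 0) x = ("workplace", 0) from by simp [pvStepB, h]]
      have hseed : keyf (pvG keyf b0 x) ≤ 0 := by
        by_cases h' : keyf b0 < keyf x
        · rw [show pvG keyf b0 x = x from by simp [pvG, h']]; exact not_lt.mp h
        · rw [show pvG keyf b0 x = b0 from by simp [pvG, h']]; exact h0
      exact ih (pvG keyf b0 x) hseed

-- The key functions of the two ports agree on every scenario name.
set_option maxHeartbeats 8000000 in
theorem key_agree (cl : String) :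
    ∀ x ∈ scenariosList, (scenarioScores cl).getD x 0 = (scenarioCounts cl).getD x 0 := by
  intro x hx
  fin_cases hx <;>
  · simp only [scenarioScores, scenarioKeywords, List.foldl_cons, List.foldl_nil,
      PySem.Dict.getD_insert, String.reduceEq, reduceIte]
    rw [sum_filter_map_one]
    rw [scenarioCounts, getD_condIncr]
    simp only [scenariosList, List.foldl_cons, List.foldl_nil, PySem.Dict.getD_insert,
      keywordScenarios, List.map_cons, List.map_nil, List.sum_cons, List.sum_nil,
      List.count_cons, List.count_nil, beq_iff_eq, String.reduceEq, reduceIte,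
      Nat.reduceAdd, Nat.cast_zero, Nat.cast_one, Nat.cast_ofNat, ite_self, add_zero, zero_add]
    try ring

-- The two ports agree as functions of the lowered content.
set_option maxHeartbeats 8000000 in
theorem main_helper (cl : String) :
    (match PySem.List.max? (scenarioScores cl).keys (fun k => (scenarioScores cl).getD k 0) with
     | some best_scenario =>
         if (scenarioScores cl).getD best_scenario 0 > 0 then best_scenario else "workplace"
     | none => "workplace")
      = (scenariosList.foldl (fun (st : String × Int) s =>
          if (scenarioCounts cl).getD s 0 > st.2 then (s, (scenarioCounts cl).getD s 0) else st)
          ("workplace", 0)).1 := by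
  have hag := key_agree cl
  have hkeys : (scenarioScores cl).keys = scenariosList := by
    have h := PySem.Dict.keys_foldl_insert_key (l := scenarioKeywords) (key := Prod.fst)
      (f := fun d p => ((p.2.filter (fun kw => PySem.Str.isIn kw cl)).map (fun _ => (1 : Int))).sum)
      (d := (∅ : PySem.Dict String Int))
    rw [scenarioScores, h]
    decide
  rw [hkeys, max?_eq_foldl]
  rw [show (fun (st : String × Int) s =>
        if (scenarioCounts cl).getD s 0 > st.2 then (s, (scenarioCounts cl).getD s 0) else st)
      = pvStepB (fun s => (scenarioCounts cl).getD s 0) from rfl]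
  rw [show scenariosList = "school" :: pvRest from rfl]
  simp only [List.foldl_cons]
  rw [show pvKeyStep (fun k => (scenarioScores cl).getD k 0) none "school" = some "school" from rfl]
  rw [maxfold_some]
  rw [foldG_congr (fun k => (scenarioScores cl).getD k 0) (fun s => (scenarioCounts cl).getD s 0)
        pvRest "school" (fun y hy => hag y hy)]
  show (if (scenarioScores cl).getD
            (pvRest.foldl (pvG (fun s => (scenarioCounts cl).getD s 0)) "school") 0 > 0
          then pvRest.foldl (pvG (fun s => (scenarioCounts cl).getD s 0)) "school" else "workplace")
      = (pvRest.foldl (pvStepB (fun s => (scenarioCounts cl).getD s 0))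
          (pvStepB (fun s => (scenarioCounts cl).getD s 0) ("workplace", 0) "school")).1
  have hmem : pvRest.foldl (pvG (fun s => (scenarioCounts cl).getD s 0)) "school"
      ∈ ("school" :: pvRest) := by
    rcases fold_mem (fun s => (scenarioCounts cl).getD s 0) pvRest "school" with h | h
    · rw [h]; exact List.mem_cons_self
    · exact List.mem_cons_of_mem _ h
  rw [hag _ hmem]
  by_cases h : 0 < (scenarioCounts cl).getD "school" 0
  · rw [show pvStepB (fun s => (scenarioCounts cl).getD s 0) ("workplace", 0) "school"
          = ("school", (scenarioCounts cl).getD "school" 0) from by simp [pvStepB, h]]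
    rw [fusedB (fun s => (scenarioCounts cl).getD s 0) pvRest "school"]
    rw [if_pos (lt_of_lt_of_le h (keyf_le_fold (fun s => (scenarioCounts cl).getD s 0) pvRest "school"))]
  · rw [show pvStepB (fun s => (scenarioCounts cl).getD s 0) ("workplace", 0) "school"
          = ("workplace", 0) from by simp [pvStepB, h]]
    rw [stepB_zero_seed (fun s => (scenarioCounts cl).getD s 0) pvRest "school" (not_lt.mp h)]

-- ===== VERDICT (by name: the statement is the Claim_ definition above) =====
set_option maxHeartbeats 8000000 in
theorem detect_scenario_from_content_spec : Claim_equal_detect_scenario_from_content := by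
  intro content _
  exact main_helper (PySem.Str.lower content)
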